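-- pv_equiv track=rewrite | github.com/bharatramanaik/Maze-solver-bot | PathConverter.py | generate_movement_instructions
-- ===== SOURCE A (Python) =====
-- def generate_movement_instructions(path):
--     """
--     Generates instructions for moving along a discontinuous path.
--
--     Args:
--         path (list): A list of coordinate pairs representing the path, where the first element is the column and the second element is the row.
--
--     Returns:
--         list: A list of instructions, similar to the previous version.
--     """
--
--     instructions = []
--
--     for i in range(len(path) - 1):
--         start_x, start_y = path[i]
--         end_x, end_y = path[i + 1]
--
--         # Determine the direction and distance for this segment
--         if start_x < end_x and start_y == end_y:  # Move forward
--             direction = "forward"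
--             distance = end_x - start_x
--         elif start_x == end_x and start_y < end_y:  # Turn right
--             direction = "right"
--             distance = end_y - start_y
--         elif start_x == end_x and start_y > end_y:  # Turn left
--             direction = "left"
--             distance = start_y - end_y
--         else:
--             direction = "right"
--             distance = start_x - end_x
--
--         # Move in the determined direction
--         while distance > 0:
--             instructions.append(("moveForward"))
--             distance -= 1
--
--         # Turn if necessary for the next segment
--         if i < len(path) - 2:
--             next_x, next_y = path[i + 2]
--             if direction == "forward" and next_y != end_y:
--                 instructions.append(("turnRight" if next_y > end_y else "turnLeft"))
--             elif direction == "right" and next_x != end_x: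
--                 instructions.append(("turnLeft"))
--             elif direction == "left" and next_x != end_x:
--                 instructions.append(("turnRight"))
--
--     return instructions
-- ===== SOURCE B (Python) =====
-- def generate_movement_instructions(path):
--     # Pass 1: classify each consecutive pair into a segment record
--     # (direction, distance, end_x, end_y), matching A's classification.
--     segments = []
--     for (sx, sy), (ex, ey) in zip(path, path[1:]):
--         if sx < ex and sy == ey:
--             segments.append(("forward", ex - sx, ex, ey))
--         elif sx == ex and sy < ey:
--             segments.append(("right", ey - sy, ex, ey))
--         elif sx == ex and sy > ey:
--             segments.append(("left", sy - ey, ex, ey))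
--         else:
--             segments.append(("right", sx - ex, ex, ey))
--     # Pass 2: emit moves for each segment, then a turn decided by the
--     # next segment's end point (= path[i+2]).
--     out = []
--     for i, (d, dist, ex, ey) in enumerate(segments):
--         out.extend(["moveForward"] * max(dist, 0))
--         if i + 1 < len(segments):
--             nx, ny = segments[i + 1][2], segments[i + 1][3]
--             if d == "forward" and ny != ey:
--                 out.append("turnRight" if ny > ey else "turnLeft")
--             elif d != "forward" and nx != ex:
--                 out.append("turnLeft" if d == "right" else "turnRight")
--     return out
-- ===== Notes on version B (the rewrite author's own statement) =====
-- stated objective: alternative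
-- what changed: A's single indexed loop (with a while-loop emitting moves and a lookahead at path[i+2]) is re-decomposed into two passes: pass 1 classifies zip(path, path[1:]) into segment records (direction, distance, end point), pass 2 emits replicated moves per record and decides each turn from the next record's stored end point.
import Mathlib
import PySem

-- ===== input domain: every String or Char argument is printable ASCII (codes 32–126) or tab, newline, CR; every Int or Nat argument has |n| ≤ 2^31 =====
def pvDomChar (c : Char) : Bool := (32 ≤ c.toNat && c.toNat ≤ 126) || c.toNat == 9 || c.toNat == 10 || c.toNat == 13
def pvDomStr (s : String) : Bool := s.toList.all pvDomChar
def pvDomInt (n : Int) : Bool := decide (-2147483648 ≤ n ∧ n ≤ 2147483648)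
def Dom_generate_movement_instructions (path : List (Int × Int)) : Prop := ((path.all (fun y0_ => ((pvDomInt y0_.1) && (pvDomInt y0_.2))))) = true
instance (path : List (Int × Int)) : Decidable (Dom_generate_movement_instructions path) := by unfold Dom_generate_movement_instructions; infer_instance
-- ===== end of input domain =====

-- B re-decomposes A's indexed loop into two passes (classify all segments into
-- records, then emit moves and turns by looking at the next record); same
-- return value, objective: alternative decomposition (no speed claim).

-- ===== PORT A =====
-- the 'while distance > 0: append("moveForward")' loop of A
def pvEmitMoves (d : Int) : List String :=
  if h : 0 < d then "moveForward" :: pvEmitMoves (d - 1) else []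
termination_by d.toNat
decreasing_by omega

def generate_movement_instructions (path : List (Int × Int)) : List String :=
  (PySem.List.pyRange 0 ((path.length : Int) - 1) 1).foldl (fun instructions i =>
    let s := PySem.List.pyGetD path i ((0 : Int), (0 : Int))
    let e := PySem.List.pyGetD path (i + 1) ((0 : Int), (0 : Int))
    let dd : String × Int :=
      if s.1 < e.1 ∧ s.2 = e.2 then ("forward", e.1 - s.1)
      else if s.1 = e.1 ∧ s.2 < e.2 then ("right", e.2 - s.2)
      else if s.1 = e.1 ∧ s.2 > e.2 then ("left", s.2 - e.2)
      else ("right", s.1 - e.1)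
    let instructions := instructions ++ pvEmitMoves dd.2
    if i < (path.length : Int) - 2 then
      let nxt := PySem.List.pyGetD path (i + 2) ((0 : Int), (0 : Int))
      if dd.1 = "forward" ∧ nxt.2 ≠ e.2 then
        instructions ++ [if nxt.2 > e.2 then "turnRight" else "turnLeft"]
      else if dd.1 = "right" ∧ nxt.1 ≠ e.1 then instructions ++ ["turnLeft"]
      else if dd.1 = "left" ∧ nxt.1 ≠ e.1 then instructions ++ ["turnRight"]
      else instructions
    else instructions) []

-- ===== PORT B =====
-- one segment record: (direction, distance, end_x, end_y)
def pvSeg (p q : Int × Int) : String × Int × Int × Int :=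
  if p.1 < q.1 ∧ p.2 = q.2 then ("forward", q.1 - p.1, q.1, q.2)
  else if p.1 = q.1 ∧ p.2 < q.2 then ("right", q.2 - p.2, q.1, q.2)
  else if p.1 = q.1 ∧ p.2 > q.2 then ("left", p.2 - q.2, q.1, q.2)
  else ("right", p.1 - q.1, q.1, q.2)

-- pass 1: zip(path, path[1:]) classified into records
def pvSegs (path : List (Int × Int)) : List (String × Int × Int × Int) :=
  (path.zip path.tail).map (fun pq => pvSeg pq.1 pq.2)

-- pass 2: moves for each record, turn decided by the next record's end point
def pvEmit : List (String × Int × Int × Int) → List String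
  | [] => []
  | [s] => List.replicate (max s.2.1 0).toNat "moveForward"
  | s :: t :: rest =>
      List.replicate (max s.2.1 0).toNat "moveForward" ++
      (if s.1 = "forward" ∧ t.2.2.2 ≠ s.2.2.2 then
         [if t.2.2.2 > s.2.2.2 then "turnRight" else "turnLeft"]
       else if s.1 ≠ "forward" ∧ t.2.2.1 ≠ s.2.2.1 then
         [if s.1 = "right" then "turnLeft" else "turnRight"]
       else []) ++ pvEmit (t :: rest)

def generate_movement_instructions_alt (path : List (Int × Int)) : List String :=
  pvEmit (pvSegs path)

-- ===== PRECONDITION & SPEC =====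
def Spec_generate_movement_instructions (path : List (Int × Int)) (out : List String) : Prop := out = generate_movement_instructions_alt path
instance (path : List (Int × Int)) (out : List String) : Decidable (Spec_generate_movement_instructions path out) := by unfold Spec_generate_movement_instructions; infer_instance

-- ===== CLAIM (what is proved, stated in full; the proofs are below) =====
def Claim_equal_generate_movement_instructions : Prop := ∀ (path : List (Int × Int)), Dom_generate_movement_instructions path → Spec_generate_movement_instructions path (generate_movement_instructions path)

-- ===== LEMMAS AND PROOFS =====

theorem pvEmitMoves_eq (d : Int) :
    pvEmitMoves d = List.replicate (max d 0).toNat "moveForward" := by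
  rw [pvEmitMoves]
  by_cases h : 0 < d
  · have hn : (max d 0).toNat = (max (d - 1) 0).toNat + 1 := by omega
    simp [h, pvEmitMoves_eq (d - 1), hn, List.replicate_succ]
  · have hn : (max d 0).toNat = 0 := by omega
    simp [h, hn]
termination_by d.toNat
decreasing_by omega

-- the output contributed by A's loop iteration i
def pvBodyA (path : List (Int × Int)) (i : Int) : List String :=
  let s := PySem.List.pyGetD path i ((0 : Int), (0 : Int))
  let e := PySem.List.pyGetD path (i + 1) ((0 : Int), (0 : Int))
  let dd : String × Int :=
    if s.1 < e.1 ∧ s.2 = e.2 then ("forward", e.1 - s.1)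
    else if s.1 = e.1 ∧ s.2 < e.2 then ("right", e.2 - s.2)
    else if s.1 = e.1 ∧ s.2 > e.2 then ("left", s.2 - e.2)
    else ("right", s.1 - e.1)
  pvEmitMoves dd.2 ++
  (if i < (path.length : Int) - 2 then
    let nxt := PySem.List.pyGetD path (i + 2) ((0 : Int), (0 : Int))
    if dd.1 = "forward" ∧ nxt.2 ≠ e.2 then
      [if nxt.2 > e.2 then "turnRight" else "turnLeft"]
    else if dd.1 = "right" ∧ nxt.1 ≠ e.1 then ["turnLeft"]
    else if dd.1 = "left" ∧ nxt.1 ≠ e.1 then ["turnRight"]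
    else []
  else [])

theorem genA_eq_flatMap (path : List (Int × Int)) :
    generate_movement_instructions path =
      (PySem.List.pyRange 0 ((path.length : Int) - 1) 1).flatMap (pvBodyA path) := by
  unfold generate_movement_instructions
  have h := PySem.List.foldl_append_eq_flatMap (pvBodyA path)
    (l := PySem.List.pyRange 0 ((path.length : Int) - 1) 1) (acc := ([] : List String))
  rw [List.nil_append] at h
  rw [← h]
  apply PySem.List.foldl_congr_mem
  intro acc i _
  simp only [pvBodyA]
  split_ifs <;> simp

theorem pvBodyA_shift (a : Int × Int) (t : List (Int × Int)) (k : Nat) :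
    pvBodyA (a :: t) ((k : Int) + 1) = pvBodyA t (k : Int) := by
  have hcons : ∀ (m : Nat), PySem.List.pyGetD (a :: t) ((m : Int) + 1) ((0 : Int), (0 : Int))
      = t.getD m ((0 : Int), (0 : Int)) := by
    intro m
    rw [show ((m : Int) + 1) = ((m + 1 : Nat) : Int) from by push_cast; ring,
      PySem.List.pyGetD_natCast, List.getD_cons_succ]
  have g2 : PySem.List.pyGetD (a :: t) ((k : Int) + 1 + 1) ((0 : Int), (0 : Int))
      = t.getD (k + 1) ((0 : Int), (0 : Int)) := by
    rw [show ((k : Int) + 1 + 1) = (((k + 1 : Nat) : Int) + 1) from by push_cast; ring, hcons]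
  have g3 : PySem.List.pyGetD (a :: t) ((k : Int) + 1 + 2) ((0 : Int), (0 : Int))
      = t.getD (k + 2) ((0 : Int), (0 : Int)) := by
    rw [show ((k : Int) + 1 + 2) = (((k + 2 : Nat) : Int) + 1) from by push_cast; ring, hcons]
  have g6 : PySem.List.pyGetD t ((k : Int) + 2) ((0 : Int), (0 : Int))
      = t.getD (k + 2) ((0 : Int), (0 : Int)) := by
    rw [show ((k : Int) + 2) = ((k + 2 : Nat) : Int) from by push_cast; ring,
      PySem.List.pyGetD_natCast]
  have g5 : PySem.List.pyGetD t ((k : Int) + 1) ((0 : Int), (0 : Int))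
      = t.getD (k + 1) ((0 : Int), (0 : Int)) := by
    rw [show ((k : Int) + 1) = ((k + 1 : Nat) : Int) from by push_cast; ring,
      PySem.List.pyGetD_natCast]
  have g4 : PySem.List.pyGetD t ((k : Int)) ((0 : Int), (0 : Int))
      = t.getD k ((0 : Int), (0 : Int)) := PySem.List.pyGetD_natCast t k _
  simp only [pvBodyA, List.length_cons]
  rw [g2, g3, g6, g5, hcons k, g4]
  split_ifs <;> first | rfl | (exfalso; push_cast at *; omega)

theorem pvSeg_endx (p q : Int × Int) : (pvSeg p q).2.2.1 = q.1 := by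
  simp only [pvSeg]; split_ifs <;> rfl

theorem pvSeg_endy (p q : Int × Int) : (pvSeg p q).2.2.2 = q.2 := by
  simp only [pvSeg]; split_ifs <;> rfl

theorem head_case (a b : Int × Int) (rest : List (Int × Int)) :
    pvBodyA (a :: b :: rest) 0 ++ pvEmit (pvSegs (b :: rest))
      = pvEmit (pvSeg a b :: pvSegs (b :: rest)) := by
  have q0 : PySem.List.pyGetD (a :: b :: rest) (0 : Int) ((0 : Int), (0 : Int)) = a := by
    rw [show (0 : Int) = ((0 : Nat) : Int) from rfl, PySem.List.pyGetD_natCast]; rfl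
  have q1 : PySem.List.pyGetD (a :: b :: rest) ((0 : Int) + 1) ((0 : Int), (0 : Int)) = b := by
    rw [show ((0 : Int) + 1) = ((1 : Nat) : Int) from rfl, PySem.List.pyGetD_natCast]; rfl
  cases rest with
  | nil =>
      have hc : ¬ ((0 : Int) < (([a, b] : List (Int × Int)).length : Int) - 2) := by
        simp
      simp only [pvBodyA, q0, q1, if_neg hc, pvEmitMoves_eq, pvSegs, List.append_nil, pvSeg]
      split_ifs <;> simp [pvEmit]
  | cons c rest' =>
      have q2 : PySem.List.pyGetD (a :: b :: c :: rest') ((0 : Int) + 2) ((0 : Int), (0 : Int)) = c := by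
        rw [show ((0 : Int) + 2) = ((2 : Nat) : Int) from rfl, PySem.List.pyGetD_natCast]; rfl
      have hc : (0 : Int) < (((a :: b :: c :: rest') : List (Int × Int)).length : Int) - 2 := by
        simp only [List.length_cons]
        push_cast
        omega
      have hsegs : pvSegs (b :: c :: rest') = pvSeg b c :: pvSegs (c :: rest') := by
        simp [pvSegs]
      rw [hsegs, pvEmit]
      simp only [pvBodyA, q0, q1, q2, if_pos hc, pvEmitMoves_eq, pvSeg_endx, pvSeg_endy]
      by_cases h1 : a.1 < b.1 ∧ a.2 = b.2
      · rw [show pvSeg a b = ("forward", b.1 - a.1, b.1, b.2) from by simp [pvSeg, h1]]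
        simp [h1, List.append_assoc]
      · by_cases h2 : a.1 = b.1 ∧ a.2 < b.2
        · rw [show pvSeg a b = ("right", b.2 - a.2, b.1, b.2) from by simp [pvSeg, h2]]
          simp [h2, List.append_assoc]
        · by_cases h3 : a.1 = b.1 ∧ a.2 > b.2
          · rw [show pvSeg a b = ("left", a.2 - b.2, b.1, b.2) from by simp [pvSeg, h3, h3.2.le]]
            simp [h3, show ¬ a.2 < b.2 from by omega, List.append_assoc]
          · rw [show pvSeg a b = ("right", a.1 - b.1, b.1, b.2) from by simp [pvSeg, h1, h2, h3]]
            simp [h1, h2, h3, List.append_assoc]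

theorem main_eq (path : List (Int × Int)) :
    generate_movement_instructions path = pvEmit (pvSegs path) := by
  induction path with
  | nil => rfl
  | cons a t ih =>
    cases t with
    | nil => rfl
    | cons b rest =>
      rw [genA_eq_flatMap]
      have hlen : (((a :: b :: rest) : List (Int × Int)).length : Int) - 1
          = (rest.length : Int) + 1 := by
        simp [List.length_cons]
      rw [hlen, PySem.List.pyRange_one_cons (by positivity),
        show (0 : Int) + 1 = 1 from rfl]
      have hshift : PySem.List.pyRange 1 ((rest.length : Int) + 1) 1
          = (List.range rest.length).map (fun (k : Nat) => ((k : Int) + 1)) := by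
        rw [PySem.List.pyRange_one]
        rw [show ((rest.length : Int) + 1 - 1).toNat = rest.length from by omega]
        exact List.map_congr_left (fun k _ => by ring)
      rw [hshift, List.flatMap_cons, List.flatMap_map]
      have hfun : ((fun (k : Nat) => pvBodyA (a :: b :: rest) ((k : Int) + 1)))
          = fun (k : Nat) => pvBodyA (b :: rest) (k : Int) :=
        funext (pvBodyA_shift a (b :: rest))
      rw [show (fun (k : Nat) => pvBodyA (a :: b :: rest) ((fun (k : Nat) => ((k : Int) + 1)) k))
          = fun (k : Nat) => pvBodyA (b :: rest) (k : Int) from hfun]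
      have htail : (List.range rest.length).flatMap (fun (k : Nat) => pvBodyA (b :: rest) (k : Int))
          = pvEmit (pvSegs (b :: rest)) := by
        rw [← ih, genA_eq_flatMap]
        rw [show (((b :: rest) : List (Int × Int)).length : Int) - 1 = ((rest.length : Nat) : Int)
          from by simp [List.length_cons]]
        rw [PySem.List.pyRange_zero_natCast, List.flatMap_map]
      rw [htail]
      exact head_case a b rest

-- ===== VERDICT (by name: the statement is the Claim_ definition above) =====
theorem generate_movement_instructions_spec : Claim_equal_generate_movement_instructions := by
  intro path _
  unfold Spec_generate_movement_instructions generate_movement_instructions_alt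
  exact main_eq path
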